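-- pv_equiv track=rewrite | github.com/Und3rf10w/ai-ghidra-tools | plugins/ghidra/ghidra_scripts/search_bytes.py | parse_byte_pattern
-- ===== SOURCE A (Python) =====
-- def parse_byte_pattern(pattern_str):
--     """
--     Parse a byte pattern string into bytes and mask.
--
--     Supports formats:
--     - "48 8b 05" - space-separated hex
--     - "488b05" - continuous hex
--     - "48 ?? 05" - with wildcards
--     - "48 8b ?5" - partial wildcards
--
--     Returns: (bytes_list, mask_list) where mask is 0xff for exact match, 0x00 for wildcard
--     """
--     # Remove spaces and normalize
--     pattern = pattern_str.replace(" ", "").lower()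
--
--     if len(pattern) % 2 != 0:
--         raise ValueError("Pattern must have even number of hex characters")
--
--     bytes_list = []
--     mask_list = []
--
--     for i in range(0, len(pattern), 2):
--         byte_str = pattern[i:i+2]
--
--         if byte_str == "??":
--             bytes_list.append(0)
--             mask_list.append(0x00)
--         elif "?" in byte_str:
--             # Partial wildcard (e.g., "?5" or "4?")
--             if byte_str[0] == "?":
--                 bytes_list.append(int(byte_str[1], 16))
--                 mask_list.append(0x0f)
--             else:
--                 bytes_list.append(int(byte_str[0], 16) << 4)
--                 mask_list.append(0xf0)
--         else:
--             bytes_list.append(int(byte_str, 16))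
--             mask_list.append(0xff)
--
--     return bytes_list, mask_list
-- ===== SOURCE B (Python) =====
-- def _nibble(c):
--     # '?' is a wildcard nibble: value 0, mask 0; any hex digit is exact: value, mask 0xf
--     if c == "?":
--         return 0, 0x0
--     return int(c, 16), 0xf
--
--
-- def parse_byte_pattern(pattern_str):
--     pattern = pattern_str.replace(" ", "").lower()
--     if len(pattern) % 2 != 0:
--         raise ValueError("Pattern must have even number of hex characters")
--     bytes_list = []
--     mask_list = []
--     for i in range(0, len(pattern), 2):
--         hv, hm = _nibble(pattern[i])
--         lv, lm = _nibble(pattern[i + 1])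
--         bytes_list.append((hv << 4) | lv)
--         mask_list.append((hm << 4) | lm)
--     return bytes_list, mask_list
-- ===== Notes on version B (the rewrite author's own statement) =====
-- stated objective: simpler
-- what changed: B replaces A's four explicit per-byte branch cases ('??', '?x', 'x?', exact) and its two-char slicing by a uniform per-nibble mapping (char -> (value, mask) nibble) combined pairwise by shift-or.
-- outside the precondition, e.g. on parse_byte_pattern('+5'): A returns ([5], [255]), B raises ValueError; on parse_byte_pattern('\t5'): A returns ([5], [255]), B raises ValueError
import Mathlib
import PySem

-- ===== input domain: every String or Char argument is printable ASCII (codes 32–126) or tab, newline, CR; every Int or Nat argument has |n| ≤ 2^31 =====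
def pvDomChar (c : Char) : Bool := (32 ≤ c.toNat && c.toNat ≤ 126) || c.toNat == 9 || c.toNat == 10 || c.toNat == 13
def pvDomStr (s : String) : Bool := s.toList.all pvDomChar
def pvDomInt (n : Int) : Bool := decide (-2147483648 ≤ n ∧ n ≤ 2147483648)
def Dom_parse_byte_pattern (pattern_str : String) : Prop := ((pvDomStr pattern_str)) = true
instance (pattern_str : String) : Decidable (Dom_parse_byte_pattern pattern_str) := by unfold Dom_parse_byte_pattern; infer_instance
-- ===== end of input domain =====

-- B replaces A's four per-byte branch cases ('??', '?x', 'x?', exact) and its two-char slicing by a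
-- uniform per-nibble (value, mask) map combined pairwise by shift-or (objective: simpler).

-- ===== PORT A =====
-- loop body of A: byte_str = pattern[i:i+2]; the four branches, each appending to both lists.
-- int(byte_str, 16) / int(byte_str[1], 16) are PySem.Int.ofCharsBase? _ 16; Python raises exactly
-- where it is none — outside Pre_ the default 0 is never reached.
def pvStepA (acc : List Int × List Int) (byte_str : List Char) : List Int × List Int :=
  if byte_str = ['?', '?'] then
    (acc.1 ++ [0], acc.2 ++ [0x00])
  else if '?' ∈ byte_str then
    if PySem.List.pyGetD byte_str 0 ' ' = '?' then
      (acc.1 ++ [(PySem.Int.ofCharsBase? [PySem.List.pyGetD byte_str 1 ' '] 16).getD 0], acc.2 ++ [0x0f])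
    else
      (acc.1 ++ [(PySem.Int.ofCharsBase? [PySem.List.pyGetD byte_str 0 ' '] 16).getD 0 <<< 4], acc.2 ++ [0xf0])
  else
    (acc.1 ++ [(PySem.Int.ofCharsBase? byte_str 16).getD 0], acc.2 ++ [0xff])

def parse_byte_pattern (pattern_str : String) : List Int × List Int :=
  let pattern : List Char := PySem.Chars.lower (PySem.Chars.replace pattern_str.toList [' '] [])
  -- 'raise ValueError' on odd length: outside Pre_, totalized as ([], [])
  if PySem.Int.mod (PySem.List.len pattern) 2 ≠ 0 then ([], [])
  else
    (PySem.List.pyRange 0 (PySem.List.len pattern) 2).foldl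
      (fun acc i => pvStepA acc (PySem.List.slice pattern (some i) (some (i + 2)))) ([], [])

-- ===== PORT B =====
-- _nibble(c): '?' ↦ (0, 0x0), hex digit ↦ (int(c,16), 0xf)
def pvNibble (c : Char) : Int × Int :=
  if c = '?' then (0, 0x0) else ((PySem.Int.ofCharsBase? [c] 16).getD 0, 0xf)

def parse_byte_pattern_alt (pattern_str : String) : List Int × List Int :=
  let pattern : List Char := PySem.Chars.lower (PySem.Chars.replace pattern_str.toList [' '] [])
  if PySem.Int.mod (PySem.List.len pattern) 2 ≠ 0 then ([], [])
  else
    (PySem.List.pyRange 0 (PySem.List.len pattern) 2).foldl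
      (fun acc i =>
        let hn := pvNibble (PySem.List.pyGetD pattern i ' ')
        let ln := pvNibble (PySem.List.pyGetD pattern (i + 1) ' ')
        (acc.1 ++ [PySem.Int.bor (hn.1 <<< 4) ln.1], acc.2 ++ [PySem.Int.bor (hn.2 <<< 4) ln.2]))
      ([], [])

-- ===== PRECONDITION & SPEC =====
-- Pre_ excludes the inputs on which A raises: odd hex length (ValueError) or a character other
-- than a hex digit / '?' (ValueError from int(_, 16)).  This also excludes chunks like "+5" or
-- "\t5" that two-character int(_, 16) tolerates (A returns there, B's per-nibble int raises).
def pvValid : List Char := "0123456789abcdef?".toList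

def Pre_parse_byte_pattern (pattern_str : String) : Prop :=
  (PySem.Chars.lower (PySem.Chars.replace pattern_str.toList [' '] [])).length % 2 = 0 ∧
  ((PySem.Chars.lower (PySem.Chars.replace pattern_str.toList [' '] [])).all
    fun c => decide (c ∈ pvValid)) = true
instance (pattern_str : String) : Decidable (Pre_parse_byte_pattern pattern_str) := by
  unfold Pre_parse_byte_pattern; infer_instance

def pvWitness_parse_byte_pattern : String := "4? A5"

def Spec_parse_byte_pattern (pattern_str : String) (out : List Int × List Int) : Prop :=
  out = parse_byte_pattern_alt pattern_str
instance (pattern_str : String) (out : List Int × List Int) :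
    Decidable (Spec_parse_byte_pattern pattern_str out) := by
  unfold Spec_parse_byte_pattern; infer_instance

-- ===== CLAIM (what is proved, stated in full; the proofs are below) =====
def Claim_equal_parse_byte_pattern : Prop :=
  ∀ (pattern_str : String), Dom_parse_byte_pattern pattern_str →
    Pre_parse_byte_pattern pattern_str →
    Spec_parse_byte_pattern pattern_str (parse_byte_pattern pattern_str)

-- ===== LEMMAS AND PROOFS =====

-- the value B's loop accumulates, chunk by chunk (proof-side characterisation of both folds)
def pvChunksB : List Char → List Int × List Int
  | a :: b :: rest =>
    let r := pvChunksB rest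
    ((PySem.Int.bor ((pvNibble a).1 <<< 4) (pvNibble b).1) :: r.1,
     (PySem.Int.bor ((pvNibble a).2 <<< 4) (pvNibble b).2) :: r.2)
  | _ => ([], [])

-- the value A's loop accumulates, chunk by chunk (proof-side characterisation of A's fold)
def pvChunksA : List Char → List Int × List Int
  | a :: b :: rest =>
    let r := pvChunksA rest
    let s := pvStepA ([], []) [a, b]
    (s.1 ++ r.1, s.2 ++ r.2)
  | _ => ([], [])

lemma pvStepA_shape (acc : List Int × List Int) (bs : List Char) :
    pvStepA acc bs = (acc.1 ++ (pvStepA ([], []) bs).1, acc.2 ++ (pvStepA ([], []) bs).2) := by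
  unfold pvStepA; split_ifs <;> simp

lemma pv_slice2 (cs : List Char) (k : Nat) :
    PySem.List.slice cs (some (2 * (k : Int))) (some (2 * (k : Int) + 2)) =
      (cs.drop (2 * k)).take 2 := by
  have h1 : (2 * (k : Int)) = ((2 * k : Nat) : Int) := by push_cast; ring
  have h2 : (2 * (k : Int) + 2) = ((2 * k + 2 : Nat) : Int) := by push_cast; ring
  rw [h2, h1, PySem.List.slice_natCast]
  congr 1
  omega

lemma pv_foldA_eq_goNat (cs : List Char) (acc : List Int × List Int) :
    (PySem.List.pyRange 0 (PySem.List.len cs) 2).foldl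
      (fun acc i => pvStepA acc (PySem.List.slice cs (some i) (some (i + 2)))) acc =
    (List.range ((cs.length + 1) / 2)).foldl
      (fun acc k => pvStepA acc ((cs.drop (2 * k)).take 2)) acc := by
  rw [PySem.List.pyRange_of_pos _ _ (by norm_num), List.foldl_map]
  rcases Nat.eq_zero_or_pos cs.length with h | h
  · simp [PySem.List.len_eq, h]
  · rw [if_pos (by simp [PySem.List.len_eq]; omega)]
    have hcnt : (((PySem.List.len cs) - 0 + 2 - 1) / 2).toNat = (cs.length + 1) / 2 := by
      simp [PySem.List.len_eq]; omega
    rw [hcnt]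
    apply PySem.List.foldl_congr_mem
    intro acc' k _
    have h0 : (0 : Int) + 2 * (k : Int) = 2 * (k : Int) := by ring
    rw [h0, pv_slice2]

lemma pv_goNat_eq_chunksA (cs : List Char) (h2 : cs.length % 2 = 0) :
    ∀ acc, (List.range ((cs.length + 1) / 2)).foldl
      (fun acc k => pvStepA acc ((cs.drop (2 * k)).take 2)) acc =
      (acc.1 ++ (pvChunksA cs).1, acc.2 ++ (pvChunksA cs).2) := by
  induction cs using pvChunksA.induct with
  | case1 a b rest ih =>
    intro acc
    have hlen : ((a :: b :: rest).length + 1) / 2 = (rest.length + 1) / 2 + 1 := by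
      simp; omega
    rw [hlen, List.range_succ_eq_map, List.foldl_cons, List.foldl_map]
    have hstep : ∀ (acc' : List Int × List Int) (k : Nat),
        pvStepA acc' (((a :: b :: rest).drop (2 * (k + 1))).take 2) =
        pvStepA acc' ((rest.drop (2 * k)).take 2) := by
      intro acc' k
      have hk : 2 * (k + 1) = 2 * k + 2 := by ring
      rw [hk]
      rfl
    have h2' : rest.length % 2 = 0 := by simp at h2; omega
    calc (List.range ((rest.length + 1) / 2)).foldl
          (fun acc' k => pvStepA acc' (((a :: b :: rest).drop (2 * (k + 1))).take 2))
          (pvStepA acc [a, b])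
        = (List.range ((rest.length + 1) / 2)).foldl
          (fun acc' k => pvStepA acc' ((rest.drop (2 * k)).take 2))
          (pvStepA acc [a, b]) := by
          apply PySem.List.foldl_congr_mem
          intro acc' k _; exact hstep acc' k
      _ = _ := by
          rw [ih h2' (pvStepA acc [a, b])]
          rw [pvStepA_shape acc [a, b]]
          simp [pvChunksA]
  | case2 cs hne =>
    intro acc
    rcases cs with _ | ⟨a, cs⟩
    · simp [pvChunksA]
    rcases cs with _ | ⟨b, cs⟩
    · simp at h2
    · exact absurd rfl (fun h => hne a b cs h)

-- the per-chunk agreement, checked over the full 17 × 17 valid-character table at once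
lemma pv_chunk_table :
    (pvValid.all fun a => pvValid.all fun b =>
      decide (pvStepA ([], []) [a, b] =
        ([PySem.Int.bor ((pvNibble a).1 <<< 4) (pvNibble b).1],
         [PySem.Int.bor ((pvNibble a).2 <<< 4) (pvNibble b).2]))) = true := by
  decide

lemma pv_chunk_eq {a b : Char} (ha : a ∈ pvValid) (hb : b ∈ pvValid) :
    pvStepA ([], []) [a, b] =
      ([PySem.Int.bor ((pvNibble a).1 <<< 4) (pvNibble b).1],
       [PySem.Int.bor ((pvNibble a).2 <<< 4) (pvNibble b).2]) := by
  have h := pv_chunk_table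
  rw [List.all_eq_true] at h
  have h1 := h a ha
  rw [List.all_eq_true] at h1
  exact of_decide_eq_true (h1 b hb)

-- B's loop body as a step on the accumulator
def pvStepB (acc : List Int × List Int) (a b : Char) : List Int × List Int :=
  (acc.1 ++ [PySem.Int.bor ((pvNibble a).1 <<< 4) (pvNibble b).1],
   acc.2 ++ [PySem.Int.bor ((pvNibble a).2 <<< 4) (pvNibble b).2])

lemma pv_foldB_eq_goNatB (cs : List Char) (acc : List Int × List Int) :
    (PySem.List.pyRange 0 (PySem.List.len cs) 2).foldl
      (fun acc i =>
        let hn := pvNibble (PySem.List.pyGetD cs i ' ')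
        let ln := pvNibble (PySem.List.pyGetD cs (i + 1) ' ')
        (acc.1 ++ [PySem.Int.bor (hn.1 <<< 4) ln.1], acc.2 ++ [PySem.Int.bor (hn.2 <<< 4) ln.2]))
      acc =
    (List.range ((cs.length + 1) / 2)).foldl
      (fun acc k => pvStepB acc (cs.getD (2 * k) ' ') (cs.getD (2 * k + 1) ' ')) acc := by
  rw [PySem.List.pyRange_of_pos _ _ (by norm_num), List.foldl_map]
  rcases Nat.eq_zero_or_pos cs.length with h | h
  · simp [PySem.List.len_eq, h]
  · rw [if_pos (by simp [PySem.List.len_eq]; omega)]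
    have hcnt : (((PySem.List.len cs) - 0 + 2 - 1) / 2).toNat = (cs.length + 1) / 2 := by
      simp [PySem.List.len_eq]; omega
    rw [hcnt]
    apply PySem.List.foldl_congr_mem
    intro acc' k _
    have e1 : (0 : Int) + 2 * (k : Int) = ((2 * k : Nat) : Int) := by push_cast; ring
    rw [e1, show ((2 * k : Nat) : Int) + 1 = ((2 * k + 1 : Nat) : Int) by push_cast; ring]
    simp only [PySem.List.pyGetD_natCast]
    simp [pvStepB]

lemma pv_goNatB_eq_chunksB (cs : List Char) (h2 : cs.length % 2 = 0) :
    ∀ acc, (List.range ((cs.length + 1) / 2)).foldl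
      (fun acc k => pvStepB acc (cs.getD (2 * k) ' ') (cs.getD (2 * k + 1) ' ')) acc =
      (acc.1 ++ (pvChunksB cs).1, acc.2 ++ (pvChunksB cs).2) := by
  induction cs using pvChunksB.induct with
  | case1 a b rest ih =>
    intro acc
    have hlen : ((a :: b :: rest).length + 1) / 2 = (rest.length + 1) / 2 + 1 := by
      simp; omega
    rw [hlen, List.range_succ_eq_map, List.foldl_cons, List.foldl_map]
    have hstep : ∀ (acc' : List Int × List Int) (k : Nat),
        pvStepB acc' ((a :: b :: rest).getD (2 * (k + 1)) ' ') ((a :: b :: rest).getD (2 * (k + 1) + 1) ' ') =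
        pvStepB acc' (rest.getD (2 * k) ' ') (rest.getD (2 * k + 1) ' ') := by
      intro acc' k
      have hk : 2 * (k + 1) = 2 * k + 2 := by ring
      rw [hk]
      rfl
    have h2' : rest.length % 2 = 0 := by simp at h2; omega
    calc (List.range ((rest.length + 1) / 2)).foldl
          (fun acc' k => pvStepB acc' ((a :: b :: rest).getD (2 * (k + 1)) ' ')
            ((a :: b :: rest).getD (2 * (k + 1) + 1) ' '))
          (pvStepB acc a b)
        = (List.range ((rest.length + 1) / 2)).foldl
          (fun acc' k => pvStepB acc' (rest.getD (2 * k) ' ') (rest.getD (2 * k + 1) ' '))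
          (pvStepB acc a b) := by
          apply PySem.List.foldl_congr_mem
          intro acc' k _; exact hstep acc' k
      _ = _ := by
          rw [ih h2' (pvStepB acc a b)]
          simp [pvChunksB, pvStepB]
  | case2 cs hne =>
    intro acc
    rcases cs with _ | ⟨a, cs⟩
    · simp [pvChunksB]
    rcases cs with _ | ⟨b, cs⟩
    · simp at h2
    · exact absurd rfl (fun h => hne a b cs h)

lemma pv_chunksA_eq_chunksB (cs : List Char) (hv : ∀ c ∈ cs, c ∈ pvValid)
    (h2 : cs.length % 2 = 0) : pvChunksA cs = pvChunksB cs := by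
  induction cs using pvChunksA.induct with
  | case1 a b rest ih =>
    have ha : a ∈ pvValid := hv a (by simp)
    have hb : b ∈ pvValid := hv b (by simp)
    have hrest : ∀ c ∈ rest, c ∈ pvValid := fun c hc => hv c (by simp [hc])
    have h2' : rest.length % 2 = 0 := by simp at h2; omega
    show pvChunksA (a :: b :: rest) = pvChunksB (a :: b :: rest)
    rw [pvChunksA, pvChunksB, ih hrest h2', pv_chunk_eq ha hb]
    simp
  | case2 cs hne =>
    rcases cs with _ | ⟨a, cs⟩
    · rfl
    rcases cs with _ | ⟨b, cs⟩
    · simp at h2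
    · exact absurd rfl (fun h => hne a b cs h)

-- ===== VERDICT (by name: the statement is the Claim_ definition above) =====
theorem parse_byte_pattern_spec : Claim_equal_parse_byte_pattern := by
  intro s _ hpre
  obtain ⟨h2, hv'⟩ := hpre
  have hv : ∀ c ∈ PySem.Chars.lower (PySem.Chars.replace s.toList [' '] []), c ∈ pvValid := by
    simpa [List.all_eq_true] using hv' 
  unfold Spec_parse_byte_pattern parse_byte_pattern parse_byte_pattern_alt
  set cs : List Char := PySem.Chars.lower (PySem.Chars.replace s.toList [' '] []) with hcs
  have hmod : PySem.Int.mod (PySem.List.len cs) 2 = 0 := by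
    rw [PySem.List.len_eq, PySem.Int.mod_eq_emod_of_pos (by norm_num : (0:Int) < 2)]
    omega
  simp only [hmod, ne_eq, not_true_eq_false, if_false]
  rw [pv_foldA_eq_goNat, pv_goNat_eq_chunksA cs h2 ([], []),
      pv_chunksA_eq_chunksB cs hv h2, pv_foldB_eq_goNatB, pv_goNatB_eq_chunksB cs h2 ([], [])]
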